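-- pv_equiv track=rewrite | github.com/Zachanardo/Intellicrack | intellicrack/core/analysis/symbolic_executor.py | _extract_path_constraints
-- ===== SOURCE A (Python) =====
-- def _extract_path_constraints(path: list[int], disasm_info: dict) -> list[str]:
--     """Extract symbolic constraints from a path."""
--     constraints = []
--
--     for addr in path[:10]:  # Analyze up to 10 addresses in path
--         hex_addr = hex(addr)
--
--         # Use disasm_info to enhance constraint generation
--         if disasm_info and addr in disasm_info:
--             instr_info = disasm_info[addr]
--             instr_text = instr_info.get("instruction", "")
--
--             # Generate constraints based on instruction type
--             if any(op in instr_text.lower() for op in ["cmp", "test"]):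
--                 constraints.append(f"comparison_constraint_{hex_addr}")
--             elif any(op in instr_text.lower() for op in ["jz", "jnz", "je", "jne"]):
--                 constraints.append(f"branch_condition_{hex_addr}")
--             elif any(op in instr_text.lower() for op in ["mov", "lea"]):
--                 constraints.append(f"data_flow_{hex_addr}")
--             elif any(op in instr_text.lower() for op in ["call"]):
--                 constraints.append(f"function_call_{hex_addr}")
--             else:
--                 constraints.append(f"generic_constraint_{hex_addr}")
--         else:
--             # Basic constraint without disassembly info
--             constraints.append(f"constraint_at_{hex_addr}")
--
--     return constraints
-- ===== SOURCE B (Python) =====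
-- PRIORITY = {"cmp": 0, "test": 0, "jz": 1, "jnz": 1, "je": 1, "jne": 1,
--             "mov": 2, "lea": 2, "call": 3}
-- PREFIXES = ("comparison_constraint_", "branch_condition_", "data_flow_",
--             "function_call_", "generic_constraint_")
--
--
-- def _extract_path_constraints(path: list[int], disasm_info: dict) -> list[str]:
--     def go(rest, budget):
--         if budget == 0 or not rest:
--             return []
--         addr = rest[0]
--         hex_addr = hex(addr)
--         if disasm_info and addr in disasm_info:
--             text = disasm_info[addr].get("instruction", "").lower()
--             best = min((p for k, p in PRIORITY.items() if k in text), default=4)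
--             label = PREFIXES[best] + hex_addr
--         else:
--             label = "constraint_at_" + hex_addr
--         return [label] + go(rest[1:], budget - 1)
--
--     return go(path, 10)
-- ===== Notes on version B (the rewrite author's own statement) =====
-- stated objective: alternative
-- what changed: Replaces A's slice-then-append accumulator loop with an explicit branch ladder by a budgeted recursion that builds the list front-to-back and classifies each instruction by taking the MINIMUM priority over a keyword->priority map (default 4) and indexing a prefix table, instead of a fixed if/elif chain.
import Mathlib
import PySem

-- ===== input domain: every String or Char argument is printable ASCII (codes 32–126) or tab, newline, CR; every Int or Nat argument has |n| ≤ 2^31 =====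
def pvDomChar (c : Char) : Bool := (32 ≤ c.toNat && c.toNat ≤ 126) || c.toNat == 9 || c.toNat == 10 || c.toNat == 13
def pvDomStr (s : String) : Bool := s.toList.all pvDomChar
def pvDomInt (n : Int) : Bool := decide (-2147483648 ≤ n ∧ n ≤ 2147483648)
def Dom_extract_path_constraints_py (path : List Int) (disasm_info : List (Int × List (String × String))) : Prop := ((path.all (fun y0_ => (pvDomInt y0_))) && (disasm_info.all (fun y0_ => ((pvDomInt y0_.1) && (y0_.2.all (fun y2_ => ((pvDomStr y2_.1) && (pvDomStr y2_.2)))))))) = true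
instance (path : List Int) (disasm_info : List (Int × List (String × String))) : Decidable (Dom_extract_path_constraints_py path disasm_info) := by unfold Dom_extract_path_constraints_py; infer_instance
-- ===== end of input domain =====

-- B is an alternative: a budgeted front-to-back recursion that classifies each address by the
-- minimum matching priority in a keyword->priority map (default 4) indexing a prefix table,
-- instead of A's slice + accumulator loop with an if/elif keyword ladder.

-- shared helper: Python's hex() builtin ('-0x…' for negatives, lowercase digits)
def pyHex (n : Int) : String :=
  (if n < 0 then "-0x" else "0x") ++ String.ofList (Nat.toDigits 16 n.natAbs)

-- ===== PORT A =====
def extract_path_constraints_py (path : List Int) (disasm_info : List (Int × List (String × String))) : List String :=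
  (PySem.List.slice path none (some 10)).foldl (fun constraints addr =>
    let hex_addr := pyHex addr
    if !disasm_info.isEmpty && (PySem.Dict.mk disasm_info).contains addr then
      let instr_info := (PySem.Dict.mk disasm_info).getD addr []
      let instr_text := (PySem.Dict.mk instr_info).getD "instruction" ""
      if ["cmp", "test"].any (fun op => PySem.Str.isIn op (PySem.Str.lower instr_text)) then
        constraints ++ ["comparison_constraint_" ++ hex_addr]
      else if ["jz", "jnz", "je", "jne"].any (fun op => PySem.Str.isIn op (PySem.Str.lower instr_text)) then
        constraints ++ ["branch_condition_" ++ hex_addr]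
      else if ["mov", "lea"].any (fun op => PySem.Str.isIn op (PySem.Str.lower instr_text)) then
        constraints ++ ["data_flow_" ++ hex_addr]
      else if ["call"].any (fun op => PySem.Str.isIn op (PySem.Str.lower instr_text)) then
        constraints ++ ["function_call_" ++ hex_addr]
      else
        constraints ++ ["generic_constraint_" ++ hex_addr]
    else
      constraints ++ ["constraint_at_" ++ hex_addr]) []

-- ===== PORT B =====
def pvPRIORITY : List (String × Int) :=
  [("cmp", 0), ("test", 0), ("jz", 1), ("jnz", 1), ("je", 1), ("jne", 1),
   ("mov", 2), ("lea", 2), ("call", 3)]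

def pvPREFIXES : List String :=
  ["comparison_constraint_", "branch_condition_", "data_flow_",
   "function_call_", "generic_constraint_"]

-- Source B's inner 'go(rest, budget)' recursion (budget is the nonnegative literal 10, so Nat)
def pvGo (disasm_info : List (Int × List (String × String))) : List Int → Nat → List String
  | _, 0 => []
  | [], _ => []
  | addr :: rest, budget + 1 =>
    let hex_addr := pyHex addr
    let label :=
      if !disasm_info.isEmpty && (PySem.Dict.mk disasm_info).contains addr then
        let text := PySem.Str.lower ((PySem.Dict.mk ((PySem.Dict.mk disasm_info).getD addr [])).getD "instruction" "")
        let best := PySem.List.minD ((pvPRIORITY.filter (fun kp => PySem.Str.isIn kp.1 text)).map (fun kp => kp.2)) (fun x => x) 4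
        -- best ∈ {0,…,4}, always in range, so the total indexing form is exact here
        PySem.List.pyGetD pvPREFIXES best "" ++ hex_addr
      else
        "constraint_at_" ++ hex_addr
    label :: pvGo disasm_info rest budget

def extract_path_constraints_py_alt (path : List Int) (disasm_info : List (Int × List (String × String))) : List String :=
  pvGo disasm_info path 10

-- ===== PRECONDITION & SPEC =====
def Spec_extract_path_constraints_py (path : List Int) (disasm_info : List (Int × List (String × String))) (out : List String) : Prop := out = extract_path_constraints_py_alt path disasm_info
instance (path : List Int) (disasm_info : List (Int × List (String × String))) (out : List String) : Decidable (Spec_extract_path_constraints_py path disasm_info out) := by unfold Spec_extract_path_constraints_py; infer_instance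

-- ===== CLAIM (what is proved, stated in full; the proofs are below) =====
def Claim_equal_extract_path_constraints_py : Prop := ∀ (path : List Int) (disasm_info : List (Int × List (String × String))), Dom_extract_path_constraints_py path disasm_info → Spec_extract_path_constraints_py path disasm_info (extract_path_constraints_py path disasm_info)

-- ===== LEMMAS AND PROOFS =====

-- the per-address value A's loop body appends
def pvAStep (disasm_info : List (Int × List (String × String))) (addr : Int) : String :=
  let hex_addr := pyHex addr
  if !disasm_info.isEmpty && (PySem.Dict.mk disasm_info).contains addr then
    let instr_text := (PySem.Dict.mk ((PySem.Dict.mk disasm_info).getD addr [])).getD "instruction" ""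
    if ["cmp", "test"].any (fun op => PySem.Str.isIn op (PySem.Str.lower instr_text)) then
      "comparison_constraint_" ++ hex_addr
    else if ["jz", "jnz", "je", "jne"].any (fun op => PySem.Str.isIn op (PySem.Str.lower instr_text)) then
      "branch_condition_" ++ hex_addr
    else if ["mov", "lea"].any (fun op => PySem.Str.isIn op (PySem.Str.lower instr_text)) then
      "data_flow_" ++ hex_addr
    else if ["call"].any (fun op => PySem.Str.isIn op (PySem.Str.lower instr_text)) then
      "function_call_" ++ hex_addr
    else
      "generic_constraint_" ++ hex_addr
  else
    "constraint_at_" ++ hex_addr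

-- A's keyword ladder equals B's min-priority table lookup, for any keyword predicate P
theorem pv_ladder (P : String → Bool) (hex : String) :
    (if ["cmp", "test"].any P then "comparison_constraint_" ++ hex
     else if ["jz", "jnz", "je", "jne"].any P then "branch_condition_" ++ hex
     else if ["mov", "lea"].any P then "data_flow_" ++ hex
     else if ["call"].any P then "function_call_" ++ hex
     else "generic_constraint_" ++ hex) =
    PySem.List.pyGetD pvPREFIXES
      (PySem.List.minD ((pvPRIORITY.filter (fun kp => P kp.1)).map (fun kp => kp.2)) (fun x => x) 4) "" ++ hex := by
  cases h1 : P "cmp" <;> cases h2 : P "test" <;> cases h3 : P "jz" <;> cases h4 : P "jnz" <;>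
    cases h5 : P "je" <;> cases h6 : P "jne" <;> cases h7 : P "mov" <;> cases h8 : P "lea" <;>
    cases h9 : P "call" <;>
    simp [pvPRIORITY, h1, h2, h3, h4, h5, h6, h7, h8, h9] <;> decide

-- the two branch bodies agree pointwise
theorem pv_step_eq (disasm_info : List (Int × List (String × String))) (addr : Int) :
    pvAStep disasm_info addr =
    (if !disasm_info.isEmpty && (PySem.Dict.mk disasm_info).contains addr then
      let text := PySem.Str.lower ((PySem.Dict.mk ((PySem.Dict.mk disasm_info).getD addr [])).getD "instruction" "")
      let best := PySem.List.minD ((pvPRIORITY.filter (fun kp => PySem.Str.isIn kp.1 text)).map (fun kp => kp.2)) (fun x => x) 4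
      PySem.List.pyGetD pvPREFIXES best "" ++ pyHex addr
    else
      "constraint_at_" ++ pyHex addr) := by
  unfold pvAStep
  by_cases h : (!disasm_info.isEmpty && (PySem.Dict.mk disasm_info).contains addr) = true
  · simp only [h, if_pos]
    exact pv_ladder _ (pyHex addr)
  · simp only [eq_false_of_ne_true h, if_neg Bool.false_ne_true]

-- B's recursion over (path, budget) is A's fold over the slice
theorem pv_go_eq (disasm_info : List (Int × List (String × String))) (path : List Int) (b : Nat) :
    pvGo disasm_info path b =
      (path.take b).foldl (fun cs addr => cs ++ [pvAStep disasm_info addr]) [] := by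
  rw [PySem.List.foldl_append_singleton_eq_map]
  induction path generalizing b with
  | nil => cases b <;> simp [pvGo]
  | cons x xs ih =>
    cases b with
    | zero => simp [pvGo]
    | succ b =>
      simp only [List.take_succ_cons, List.map_cons, pvGo, ih]
      rw [pv_step_eq]
      rfl

-- ===== VERDICT (by name: the statement is the Claim_ definition above) =====
theorem extract_path_constraints_py_spec : Claim_equal_extract_path_constraints_py := by
  intro path disasm_info _
  unfold Spec_extract_path_constraints_py extract_path_constraints_py extract_path_constraints_py_alt
  rw [pv_go_eq]
  have hsl : PySem.List.slice path none (some 10) = path.take 10 := by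
    simpa using PySem.List.slice_to_natCast (xs := path) (b := 10)
  rw [hsl]
  congr 1
  funext cs addr
  simp only [pvAStep]
  split_ifs <;> rfl
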